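-- pv_equiv track=rewrite | github.com/pypi-data/pypi-mirror-188 | packages/syncqb/syncqb-0.2.5-py3-none-any.whl/syncqb/xml_quickbase.py | ob32decode
-- ===== SOURCE A (Python) =====
-- ob32Characters = "abcdefghijkmnpqrstuvwxyz23456789"
--
-- def ob32decode(ob32):
--     decode = 0
--     place = 1
--
--     reverse_string = list(ob32[::-1])
--
--     # for (counter = ob32.length -1; counter >= 0; counter--):
--     for this_char in reverse_string:
--         oneDigit = ob32Characters.index(this_char)
--
--         decode += (oneDigit * place)
--         place = place * 32
--
--     return decode
-- ===== SOURCE B (Python) =====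
-- ob32Characters = "abcdefghijkmnpqrstuvwxyz23456789"
--
-- def ob32decode(ob32):
--     decode = 0
--     for this_char in ob32:
--         decode = decode * 32 + ob32Characters.index(this_char)
--     return decode
-- ===== Notes on version B (the rewrite author's own statement) =====
-- stated objective: idiomatic
-- what changed: Horner's method scanning the string forward, replacing A's reversed-list construction and place (power-of-32) accumulator with a single decode*32+digit update.
-- outside the precondition, e.g. on ob32decode('aA'): A raises ValueError, B raises ValueError
import Mathlib
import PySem

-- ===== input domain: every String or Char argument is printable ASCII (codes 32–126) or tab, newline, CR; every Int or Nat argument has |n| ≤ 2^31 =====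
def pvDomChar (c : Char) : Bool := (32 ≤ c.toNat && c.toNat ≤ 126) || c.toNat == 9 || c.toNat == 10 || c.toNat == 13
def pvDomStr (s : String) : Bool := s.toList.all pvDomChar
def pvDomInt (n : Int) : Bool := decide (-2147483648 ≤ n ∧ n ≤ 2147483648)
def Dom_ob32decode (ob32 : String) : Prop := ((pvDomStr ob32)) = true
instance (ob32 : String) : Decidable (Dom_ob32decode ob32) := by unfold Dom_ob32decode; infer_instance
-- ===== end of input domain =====

-- B decodes with Horner's method on a forward scan, dropping A's reversed list and `place` accumulator (idiomatic rewrite).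

-- ===== PORT A =====
def ob32Chars : List Char := "abcdefghijkmnpqrstuvwxyz23456789".toList

-- ob32Characters.index(this_char); total form via getD, exact under Pre_ (char present)
def ob32Digit (c : Char) : Int := ((PySem.List.index? ob32Chars c).getD 0 : Nat)

def ob32decode (ob32 : String) : Int :=
  -- reverse_string = list(ob32[::-1]); loop keeps (decode, place)
  (ob32.toList.reverse.foldl
    (fun (st : Int × Int) c => (st.1 + ob32Digit c * st.2, st.2 * 32)) (0, 1)).1

-- ===== PORT B =====
def ob32decode_alt (ob32 : String) : Int :=
  ob32.toList.foldl (fun decode c => decode * 32 + ob32Digit c) 0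

-- ===== PRECONDITION & SPEC =====
-- Pre_ excludes exactly the strings containing a character outside the ob32 alphabet,
-- on which both A and B raise ValueError from .index.
def Pre_ob32decode (ob32 : String) : Prop := ob32.toList.all (fun c => ob32Chars.contains c) = true
instance (ob32 : String) : Decidable (Pre_ob32decode ob32) := by unfold Pre_ob32decode; infer_instance
def pvWitness_ob32decode : String := "kmn2"

def Spec_ob32decode (ob32 : String) (out : Int) : Prop := out = ob32decode_alt ob32
instance (ob32 : String) (out : Int) : Decidable (Spec_ob32decode ob32 out) := by unfold Spec_ob32decode; infer_instance

-- ===== CLAIM (what is proved, stated in full; the proofs are below) =====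
def Claim_equal_ob32decode : Prop := ∀ (ob32 : String), Dom_ob32decode ob32 → Pre_ob32decode ob32 → Spec_ob32decode ob32 (ob32decode ob32)

-- ===== LEMMAS AND PROOFS =====
-- A's reversed fold with (decode, place) equals d + p · (Horner fold of the un-reversed list).
theorem ob32_fold_eq (m : List Char) : ∀ (d p : Int),
    (m.foldl (fun (st : Int × Int) c => (st.1 + ob32Digit c * st.2, st.2 * 32)) (d, p)).1
      = d + p * (m.reverse.foldl (fun decode c => decode * 32 + ob32Digit c) 0) := by
  induction m with
  | nil => intro d p; simp
  | cons c m ih =>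
      intro d p
      simp only [List.foldl_cons, List.reverse_cons, List.foldl_append, List.foldl_cons,
        List.foldl_nil, ih]
      ring

-- ===== VERDICT (by name: the statement is the Claim_ definition above) =====
theorem ob32decode_spec : Claim_equal_ob32decode := by
  intro ob32 _ _
  unfold Spec_ob32decode ob32decode ob32decode_alt
  rw [ob32_fold_eq]
  simp
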